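-- pv_equiv track=rewrite | github.com/cafrii/omega2 | 백준/Silver/2705. 팰린드롬 파티션/a2705.py | solve
-- ===== SOURCE A (Python) =====
-- def solve(A:list[int])->list[int]:
--     '''
--     Args:
--         A: list of N, to be solved against. 1<=N<=1000
--     Returns:
--         answer list.
--         answer: number of recursive palindromes on number N
--     '''
--     # recursion depth:
--     # max N is 1000 -> log_2(1000) = log 1000/log 2 ~= 10
--
--     max_n = max(A)
--     dp = [0] * (max_n+1)
--     # dp[k]는 숫자 k의 재귀적인 팰린드롬 파티션의 개수
--
--     # 미리 계산된 몇 개의 답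
--     dp[1] = 1  # 1
--     dp[2] = 2  # 1+1, 2
--     dp[3] = 2  # 1+1+1, 3
--     dp[4] = 4  # 1+1+1+1, 2+2, 1+2+1, 4
--     # dp[5] = 4  # 1+1+1+1+1, 2+1+2, 1+3+1, 5
--     # dp[6] = 6  # 1+1+1+1+1+1, 3+3, 1+1+2+1+1, 2+2+2, 1+4+1, 6
--     # dp[7] = 6  # 1+1+1+1+1+1+1, 3+1+3, 1+1+3+1+1, 2+3+2, 1+5+1, 7
--
--     def dfs(N:int)->int:
--         if N <= 0: return 0
--         if dp[N] > 0: return dp[N]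
--         # <side> [<center>] <side> 형태
--         # center 는 side 값에 따라서 없을 수도 있음.
--         # side 가 0 인 경우는 N 단독인 경우와 같음.
--         # side 값을 1부터 키워가며 찾음.
--         num = 1   # N 단독.
--         for side in range(1, N//2 + 1): # side: 1 ~ N//2
--             num += dfs(side)
--         dp[N] = num
--         return num
--
--     ans = []
--     for n in A:
--         ans.append(dfs(n))
--     return ans
-- ===== SOURCE B (Python) =====
-- def solve(A: list[int]) -> list[int]:
--     max_n = max(A)
--     dp = [0] * (max_n + 1)
--     pref = [0] * (max_n + 1)   # pref[k] = dp[1] + ... + dp[k]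
--     for k in range(1, max_n + 1):
--         dp[k] = 1 + pref[k // 2]
--         pref[k] = pref[k - 1] + dp[k]
--     return [dp[n] if n > 0 else 0 for n in A]
-- ===== Notes on version B (the rewrite author's own statement) =====
-- stated objective: faster
-- what changed: Replaced A's memoized top-down recursion (whose inner loop re-sums dfs(1..N//2) for every N, O(max^2) total) by a bottom-up DP with a running prefix-sum array, dp[k] = 1 + pref[k//2], computing each entry in O(1).
-- outside the precondition, e.g. on solve([]): A raises ValueError, B raises ValueError
import Mathlib
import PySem

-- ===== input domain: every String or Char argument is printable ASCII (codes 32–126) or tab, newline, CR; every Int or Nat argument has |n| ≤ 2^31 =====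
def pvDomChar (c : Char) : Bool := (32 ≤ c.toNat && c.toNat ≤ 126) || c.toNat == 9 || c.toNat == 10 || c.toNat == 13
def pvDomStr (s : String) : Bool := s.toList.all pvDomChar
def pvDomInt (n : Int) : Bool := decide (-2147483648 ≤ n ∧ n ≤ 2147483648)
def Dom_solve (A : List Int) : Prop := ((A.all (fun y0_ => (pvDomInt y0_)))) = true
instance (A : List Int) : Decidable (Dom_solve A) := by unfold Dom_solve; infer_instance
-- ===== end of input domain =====

-- B replaces A's memoized recursion by a bottom-up DP with a running prefix-sum array
-- (dp[k] = 1 + pref[k//2]); equivalence of the RETURN values is what is proved.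

-- ===== PORT A =====
-- dfsA/dfsLoopA: A's inner `dfs` with its memo list `dp` threaded through; the `for side` loop is dfsLoopA.
mutual
def dfsA (dp : List Int) (N : Int) : Int × List Int :=
  if N ≤ 0 then (0, dp)
  else if 0 < dp.getD N.toNat 0 then (dp.getD N.toNat 0, dp)
  else
    let r := dfsLoopA dp 1 1 (PySem.Int.floordiv N 2)
    (r.1, r.2.set N.toNat r.1)
  termination_by 2 * N.toNat + 1
  decreasing_by
    have h2 : PySem.Int.floordiv N 2 = N / 2 := PySem.Int.floordiv_eq_ediv_of_pos (by omega)
    rw [h2]; omega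
def dfsLoopA (dp : List Int) (num side hi : Int) : Int × List Int :=
  if hi < side then (num, dp)
  else
    let v := dfsA dp side
    dfsLoopA v.2 (num + v.1) (side + 1) hi
  termination_by 2 * hi.toNat + 2 * (hi + 1 - side).toNat
  decreasing_by
    · omega
    · omega
end

def solve (A : List Int) : List Int :=
  let max_n := (PySem.List.max? A (fun x => x)).getD 0
  let dp0 : List Int := List.replicate (max_n + 1).toNat 0
  let dp1 := (((dp0.set 1 1).set 2 2).set 3 2).set 4 4
  (A.foldl (fun (st : List Int × List Int) n =>
      let v := dfsA st.2 n
      (st.1 ++ [v.1], v.2)) ([], dp1)).1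

-- ===== PORT B =====
def solve_alt (A : List Int) : List Int :=
  let max_n := (PySem.List.max? A (fun x => x)).getD 0
  let sz := (max_n + 1).toNat
  let st := (PySem.List.pyRange 1 (max_n + 1)).foldl
      (fun (st : List Int × List Int) k =>
        let v := 1 + st.2.getD (PySem.Int.floordiv k 2).toNat 0
        (st.1.set k.toNat v, st.2.set k.toNat (st.2.getD (k - 1).toNat 0 + v)))
      (List.replicate sz 0, List.replicate sz 0)
  A.map (fun n => if 0 < n then st.1.getD n.toNat 0 else 0)

-- ===== PRECONDITION & SPEC =====
-- Pre_ excludes the inputs on which A raises: the empty list (max([]) is a ValueError) and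
-- lists whose maximum is below 4 (the seeding `dp[3] = 2` / `dp[4] = 4` is an IndexError there).
def Pre_solve (A : List Int) : Prop := A ≠ [] ∧ ∃ x ∈ A, 4 ≤ x
instance (A : List Int) : Decidable (Pre_solve A) := by unfold Pre_solve; infer_instance
def pvWitness_solve : List Int := [5, 1, 0, -3, 5]

def Spec_solve (A : List Int) (out : List Int) : Prop := out = solve_alt A
instance (A : List Int) (out : List Int) : Decidable (Spec_solve A out) := by unfold Spec_solve; infer_instance

-- ===== CLAIM (what is proved, stated in full; the proofs are below) =====
def Claim_equal_solve : Prop := ∀ (A : List Int), Dom_solve A → Pre_solve A → Spec_solve A (solve A)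

-- ===== LEMMAS AND PROOFS =====

-- The mathematical recurrence both programs compute: fI N = number of recursive palindrome
-- partitions of N (0 for N ≤ 0), sI side hi = fI side + fI (side+1) + … + fI hi.
mutual
def fI (N : Int) : Int :=
  if N ≤ 0 then 0 else 1 + sI 1 (N / 2)
  termination_by 2 * N.toNat + 1
  decreasing_by omega
def sI (side hi : Int) : Int :=
  if hi < side then 0 else fI side + sI (side + 1) hi
  termination_by 2 * hi.toNat + 2 * (hi + 1 - side).toNat
  decreasing_by
    · omega
    · omega
end

def InvA (dp : List Int) : Prop := ∀ i : Nat, dp.getD i 0 = 0 ∨ dp.getD i 0 = fI (i : Int)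

lemma fI_nonpos {N : Int} (h : N ≤ 0) : fI N = 0 := by rw [fI, if_pos h]

lemma sI_nil {side hi : Int} (h : hi < side) : sI side hi = 0 := by rw [sI, if_pos h]

lemma fI_pos {N : Int} (h : 1 ≤ N) : fI N = 1 + sI 1 (N / 2) := by
  rw [fI, if_neg (by omega)]

lemma sI_succ : ∀ (k : Nat) (side hi : Int), (hi + 1 - side).toNat = k → side ≤ hi + 1 →
    sI side (hi + 1) = sI side hi + fI (hi + 1) := by
  intro k
  induction k with
  | zero => intro side hi hk hle
            have hs : side = hi + 1 := by omega
            subst hs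
            rw [sI, if_neg (by omega), sI_nil (by omega), sI_nil (by omega)]; ring
  | succ n ih =>
      intro side hi hk hle
      have hlt : side ≤ hi := by omega
      rw [sI, if_neg (by omega), ih (side + 1) hi (by omega) (by omega)]
      conv_rhs => rw [sI]
      rw [if_neg (by omega)]; ring

lemma invA_set {dp : List Int} (h : InvA dp) {n : Nat} {a : Int} (ha : a = fI (n : Int)) :
    InvA (dp.set n a) := by
  intro i
  by_cases hin : n = i
  · subst hin
    by_cases hlen : n < dp.length
    · right
      rw [List.getD_eq_getElem?_getD, List.getElem?_set, if_pos rfl, if_pos hlen]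
      simpa using ha
    · have : (dp.set n a).getD n 0 = dp.getD n 0 := by
        rw [List.getD_eq_getElem?_getD, List.getD_eq_getElem?_getD,
            List.getElem?_set, if_pos rfl, if_neg hlen]
        simp [List.getElem?_eq_none (by omega : dp.length ≤ n)]
      rw [this]; exact h n
  · have : (dp.set n a).getD i 0 = dp.getD i 0 := by
      rw [List.getD_eq_getElem?_getD, List.getD_eq_getElem?_getD, List.getElem?_set, if_neg hin]
    rw [this]; exact h i

-- Memoized dfs computes fI and preserves the memo invariant.
lemma dfs_ok : ∀ (m : Nat),
    (∀ (dp : List Int) (N : Int), 2 * N.toNat + 1 ≤ m → InvA dp →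
      (dfsA dp N).1 = fI N ∧ InvA (dfsA dp N).2) ∧
    (∀ (dp : List Int) (num side hi : Int), 2 * hi.toNat + 2 * (hi + 1 - side).toNat ≤ m → InvA dp →
      (dfsLoopA dp num side hi).1 = num + sI side hi ∧ InvA (dfsLoopA dp num side hi).2) := by
  intro m
  induction m with
  | zero =>
      constructor
      · intro dp N hm; omega
      · intro dp num side hi hm hinv
        have hlt : hi < side := by omega
        rw [dfsLoopA, if_pos hlt, sI_nil hlt]
        exact ⟨by ring, hinv⟩
  | succ m ih =>
      constructor
      · intro dp N hm hinv
        rw [dfsA]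
        by_cases h0 : N ≤ 0
        · rw [if_pos h0]; exact ⟨(fI_nonpos h0).symm, hinv⟩
        · rw [if_neg h0]
          by_cases hmemo : 0 < dp.getD N.toNat 0
          · rw [if_pos hmemo]
            refine ⟨?_, hinv⟩
            have hNN : ((N.toNat : Nat) : Int) = N := by omega
            rcases hinv N.toNat with hz | hv
            · omega
            · rw [hv, hNN]
          · rw [if_neg hmemo]
            have h2 : PySem.Int.floordiv N 2 = N / 2 := PySem.Int.floordiv_eq_ediv_of_pos (by omega)
            have hloop := ih.2 dp 1 1 (PySem.Int.floordiv N 2) (by rw [h2]; omega) hinv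
            have hNN : ((N.toNat : Nat) : Int) = N := by omega
            simp only []
            refine ⟨?_, ?_⟩
            · rw [hloop.1, h2, fI_pos (by omega)]
            · exact invA_set hloop.2 (by rw [hloop.1, h2, fI_pos (by omega), hNN])
      · intro dp num side hi hm hinv
        rw [dfsLoopA]
        by_cases hlt : hi < side
        · rw [if_pos hlt, sI_nil hlt]; exact ⟨by ring, hinv⟩
        · rw [if_neg hlt]
          have hd := ih.1 dp side (by omega) hinv
          have hrec := ih.2 (dfsA dp side).2 (num + (dfsA dp side).1) (side + 1) hi (by omega) hd.2
          simp only []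
          refine ⟨?_, hrec.2⟩
          rw [hrec.1, hd.1]
          conv_rhs => rw [sI]
          rw [if_neg hlt]; ring
  
-- A's answer loop appends fI of each query.
lemma foldA_ok : ∀ (A : List Int) (acc : List Int) (dp : List Int), InvA dp →
    (A.foldl (fun (st : List Int × List Int) n =>
      let v := dfsA st.2 n
      (st.1 ++ [v.1], v.2)) (acc, dp)).1 = acc ++ A.map fI := by
  intro A
  induction A with
  | nil => intro acc dp _; simp
  | cons n t ih =>
      intro acc dp hinv
      have h := (dfs_ok (2 * n.toNat + 1)).1 dp n le_rfl hinv
      simp only [List.foldl_cons, List.map_cons]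
      rw [ih (acc ++ [(dfsA dp n).1]) (dfsA dp n).2 h.2, h.1]
      simp

-- B-side loop invariant.
def InvB (sz : Nat) (n : Int) (st : List Int × List Int) : Prop :=
  st.1.length = sz ∧ st.2.length = sz ∧ st.2.getD 0 0 = 0 ∧
  ∀ j : Nat, 1 ≤ j → (j : Int) ≤ n → st.1.getD j 0 = fI (j : Int) ∧ st.2.getD j 0 = sI 1 (j : Int)

lemma getD_set_ne {dp : List Int} {n i : Nat} (h : n ≠ i) :
    (dp.set n a).getD i 0 = dp.getD i 0 := by
  rw [List.getD_eq_getElem?_getD, List.getD_eq_getElem?_getD, List.getElem?_set, if_neg h]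

lemma getD_set_self {dp : List Int} {n : Nat} {a : Int} (h : n < dp.length) :
    (dp.set n a).getD n 0 = a := by
  rw [List.getD_eq_getElem?_getD, List.getElem?_set, if_pos rfl, if_pos h]; rfl

lemma foldB_ok (sz : Nat) : ∀ (n : Nat), (n : Int) < (sz : Int) →
    InvB sz (n : Int)
      ((PySem.List.pyRange 1 ((n : Int) + 1)).foldl
        (fun (st : List Int × List Int) k =>
          let v := 1 + st.2.getD (PySem.Int.floordiv k 2).toNat 0
          (st.1.set k.toNat v, st.2.set k.toNat (st.2.getD (k - 1).toNat 0 + v)))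
        (List.replicate sz 0, List.replicate sz 0)) := by
  intro n
  induction n with
  | zero =>
      intro hsz
      rw [PySem.List.pyRange_one_eq_nil (by omega)]
      refine ⟨by simp, by simp, ?_, ?_⟩
      · exact List.getD_replicate 0 (by omega)
      · intro j h1 h2; omega
  | succ n ih =>
      intro hsz
      have ihn := ih (by omega)
      have hsplit : PySem.List.pyRange 1 ((n : Int) + 1 + 1) =
          PySem.List.pyRange 1 ((n : Int) + 1) ++ [(n : Int) + 1] :=
        PySem.List.pyRange_one_succ_right (by omega)
      push_cast
      rw [hsplit, List.foldl_append]
      set st := ((PySem.List.pyRange 1 ((n : Int) + 1)).foldl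
        (fun (st : List Int × List Int) k =>
          let v := 1 + st.2.getD (PySem.Int.floordiv k 2).toNat 0
          (st.1.set k.toNat v, st.2.set k.toNat (st.2.getD (k - 1).toNat 0 + v)))
        (List.replicate sz 0, List.replicate sz 0)) with hst
      obtain ⟨hl1, hl2, h0, hj⟩ := ihn
      simp only [List.foldl_cons, List.foldl_nil]
      have hk : ((n : Int) + 1).toNat = n + 1 := by omega
      have hfd : PySem.Int.floordiv ((n : Int) + 1) 2 = ((n : Int) + 1) / 2 :=
        PySem.Int.floordiv_eq_ediv_of_pos (by omega)
      have hhalf : (((n : Int) + 1) / 2).toNat = (n + 1) / 2 := by omega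
      have hhalf_le : ((n + 1) / 2 : Nat) ≤ n := by omega
      -- the value written into dp[n+1] is fI (n+1)
      have hv : 1 + st.2.getD (PySem.Int.floordiv ((n : Int) + 1) 2).toNat 0 = fI ((n : Int) + 1) := by
        rw [hfd, hhalf, fI_pos (by omega)]
        congr 1
        by_cases hz : ((n + 1) / 2 : Nat) = 0
        · rw [hz, h0, sI_nil (by omega)]
        · have := (hj ((n + 1) / 2) (by omega) (by omega)).2
          rw [this]
          congr 1
      -- the value written into pref[n+1] is sI 1 (n+1)
      have hp : st.2.getD (((n : Int) + 1) - 1).toNat 0 +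
          (1 + st.2.getD (PySem.Int.floordiv ((n : Int) + 1) 2).toNat 0) = sI 1 ((n : Int) + 1) := by
        rw [hv]
        have hstep := sI_succ ((n : Int) + 1 - 1).toNat 1 (n : Int) rfl (by omega)
        rw [hstep]
        congr 1
        have : (((n : Int) + 1) - 1).toNat = n := by omega
        rw [this]
        by_cases hz : n = 0
        · subst hz; rw [h0, sI_nil (by omega)]
        · exact (hj n (by omega) (by omega)).2
      refine ⟨by simpa using hl1, by simpa using hl2, ?_, ?_⟩
      · rw [getD_set_ne (by omega), h0]
      · intro j h1 h2
        by_cases hje : j = n + 1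
        · subst hje
          constructor
          · rw [hk, getD_set_self (by omega), hv]; push_cast; ring_nf
          · rw [hk, getD_set_self (by omega), hp]; push_cast; ring_nf
        · have hjle : (j : Int) ≤ (n : Int) := by omega
          have hne : ((n : Int) + 1).toNat ≠ j := by omega
          rw [getD_set_ne hne, getD_set_ne hne]
          exact hj j h1 hjle

-- initial memo of A satisfies the invariant (dp[1..4] = 1,2,2,4 are the fI values)
lemma fI_one : fI 1 = 1 := by rw [fI_pos (by norm_num), sI_nil (by norm_num)]; norm_num
lemma fI_two : fI 2 = 2 := by
  rw [fI_pos (by norm_num)]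
  norm_num [sI, fI_one, sI_nil]
lemma fI_three : fI 3 = 2 := by
  rw [fI_pos (by norm_num)]
  norm_num [sI, fI_one, sI_nil]
lemma fI_four : fI 4 = 4 := by
  rw [fI_pos (by norm_num)]
  norm_num [sI, fI_one, fI_two, sI_nil]

lemma invA_replicate (sz : Nat) : InvA (List.replicate sz (0 : Int)) := by
  intro i
  left
  by_cases h : i < sz
  · exact List.getD_replicate 0 h
  · rw [List.getD_eq_getElem?_getD, List.getElem?_eq_none (by simpa using by omega)]; rfl

lemma invA_init (sz : Nat) :
    InvA (((((List.replicate sz (0:Int)).set 1 1).set 2 2).set 3 2).set 4 4) := by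
  have h1 := invA_set (invA_replicate sz) (n := 1) (a := 1) (by norm_num [fI_one])
  have h2 := invA_set h1 (n := 2) (a := 2) (by norm_num [fI_two])
  have h3 := invA_set h2 (n := 3) (a := 2) (by norm_num [fI_three])
  exact invA_set h3 (n := 4) (a := 4) (by norm_num [fI_four])

-- ===== VERDICT (by name: the statement is the Claim_ definition above) =====
theorem solve_spec : Claim_equal_solve := by
  intro A _ hpre
  obtain ⟨hne, x, hxA, hx4⟩ := hpre
  unfold Spec_solve solve solve_alt
  -- the maximum
  obtain ⟨m, hm⟩ : ∃ m, PySem.List.max? A (fun x => x) = some m := by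
    cases hmax : PySem.List.max? A (fun x => x) with
    | none => exact absurd ((PySem.List.max?_eq_none_iff A _).1 hmax) hne
    | some m => exact ⟨m, rfl⟩
  have hmax := PySem.List.max?_isMax hm
  have hm4 : 4 ≤ m := le_trans hx4 (hmax x hxA)
  simp only [hm, Option.getD_some]
  -- A's side
  rw [foldA_ok A [] _ (invA_init (m + 1).toNat)]
  -- B's side
  have hB := foldB_ok (m + 1).toNat m.toNat (by omega)
  have hcast : ((m.toNat : Int)) = m := by omega
  rw [hcast] at hB
  obtain ⟨-, -, -, hj⟩ := hB
  simp only [List.nil_append]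
  apply List.map_congr_left
  intro n hnA
  by_cases hn : 0 < n
  · rw [if_pos hn]
    have hnm : n ≤ m := hmax n hnA
    have := (hj n.toNat (by omega) (by omega)).1
    rw [this]; congr 1; omega
  · rw [if_neg hn, fI_nonpos (by omega)]
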